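-- pv_equiv track=rewrite | github.com/guillp/adventofcode | aoc2017/21.py | transformations
-- ===== SOURCE A (Python) =====
-- from collections.abc import Iterator, Sequence
--
-- Pixels = frozenset[tuple[int, int]]
--
-- def to_pixels(pattern: Sequence[str]) -> Pixels:
--     return frozenset((x, y) for y, line in enumerate(pattern) for x, c in enumerate(line) if c == "#")
--
-- def transformations(pattern: Sequence[str]) -> Iterator[Pixels]:
--     h = len(pattern) - 1
--     p = to_pixels(pattern)
--     yield p
--     yield (p := frozenset((y, x) for x, y in p))
--     yield (p := frozenset((x, h - y) for x, y in p))
--     yield (p := frozenset((y, x) for x, y in p))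
--     yield (p := frozenset((x, h - y) for x, y in p))
--     yield (p := frozenset((y, x) for x, y in p))
--     yield (p := frozenset((x, h - y) for x, y in p))
--     yield (p := frozenset((y, x) for x, y in p))
-- ===== SOURCE B (Python) =====
-- def to_pixels(pattern):
--     return frozenset((x, y) for y, line in enumerate(pattern) for x, c in enumerate(line) if c == "#")
--
-- def transformations(pattern):
--     h = len(pattern) - 1
--     p = to_pixels(pattern)
--     maps = [
--         lambda x, y: (x, y),
--         lambda x, y: (y, x),
--         lambda x, y: (y, h - x),
--         lambda x, y: (h - x, y),
--         lambda x, y: (h - x, h - y),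
--         lambda x, y: (h - y, h - x),
--         lambda x, y: (h - y, x),
--         lambda x, y: (x, h - y),
--     ]
--     for m in maps:
--         yield frozenset(m(x, y) for x, y in p)
-- ===== Notes on version B (the rewrite author's own statement) =====
-- stated objective: alternative
-- what changed: A builds the 8 symmetries as a chain of walrus-reassigned sets, each derived from the previous one; B applies eight independent closed-form dihedral coordinate maps directly to the original pixel set.
import Mathlib
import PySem

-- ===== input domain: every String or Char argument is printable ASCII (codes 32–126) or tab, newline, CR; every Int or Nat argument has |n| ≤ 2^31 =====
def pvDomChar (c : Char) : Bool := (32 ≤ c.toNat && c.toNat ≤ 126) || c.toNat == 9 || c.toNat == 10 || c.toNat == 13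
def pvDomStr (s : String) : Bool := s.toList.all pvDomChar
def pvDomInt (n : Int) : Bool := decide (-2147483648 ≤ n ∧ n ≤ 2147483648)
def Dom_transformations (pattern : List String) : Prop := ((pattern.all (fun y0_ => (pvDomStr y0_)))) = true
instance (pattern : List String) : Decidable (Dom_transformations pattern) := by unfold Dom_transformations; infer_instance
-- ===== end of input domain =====

-- B replaces A's chained walrus transforms (each set built from the previous one) by eight
-- independent closed-form coordinate maps applied directly to the original pixel set (objective: alternative).

-- ===== PORT A =====
-- shared helper: to_pixels (both Pythons define it identically)
def toPixels (pattern : List String) : PySem.Set (Int × Int) :=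
  PySem.Set.ofList
    ((PySem.List.enumerate pattern 0).flatMap (fun yl =>
      (PySem.List.enumerate yl.2.toList 0).filterMap (fun xc =>
        if xc.2 = '#' then some (xc.1, yl.1) else none)))

def transformations (pattern : List String) : List (List (Int × Int)) :=
  let h : Int := PySem.List.len pattern - 1
  let p0 := toPixels pattern
  let p1 := PySem.Set.ofList (p0.map (fun q => (q.2, q.1)))
  let p2 := PySem.Set.ofList (p1.map (fun q => (q.1, h - q.2)))
  let p3 := PySem.Set.ofList (p2.map (fun q => (q.2, q.1)))
  let p4 := PySem.Set.ofList (p3.map (fun q => (q.1, h - q.2)))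
  let p5 := PySem.Set.ofList (p4.map (fun q => (q.2, q.1)))
  let p6 := PySem.Set.ofList (p5.map (fun q => (q.1, h - q.2)))
  let p7 := PySem.Set.ofList (p6.map (fun q => (q.2, q.1)))
  [p0, p1, p2, p3, p4, p5, p6, p7]

-- ===== PORT B =====
def transformations_alt (pattern : List String) : List (List (Int × Int)) :=
  let h : Int := PySem.List.len pattern - 1
  let p := toPixels pattern
  [ PySem.Set.ofList (p.map (fun q => (q.1, q.2))),
    PySem.Set.ofList (p.map (fun q => (q.2, q.1))),
    PySem.Set.ofList (p.map (fun q => (q.2, h - q.1))),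
    PySem.Set.ofList (p.map (fun q => (h - q.1, q.2))),
    PySem.Set.ofList (p.map (fun q => (h - q.1, h - q.2))),
    PySem.Set.ofList (p.map (fun q => (h - q.2, h - q.1))),
    PySem.Set.ofList (p.map (fun q => (h - q.2, q.1))),
    PySem.Set.ofList (p.map (fun q => (q.1, h - q.2))) ]

-- ===== PRECONDITION & SPEC =====
def Spec_transformations (pattern : List String) (out : List (List (Int × Int))) : Prop := out = transformations_alt pattern
instance (pattern : List String) (out : List (List (Int × Int))) : Decidable (Spec_transformations pattern out) := by unfold Spec_transformations; infer_instance

-- ===== CLAIM (what is proved, stated in full; the proofs are below) =====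
def Claim_equal_transformations : Prop := ∀ (pattern : List String), Dom_transformations pattern → Spec_transformations pattern (transformations pattern)

-- ===== LEMMAS AND PROOFS =====

-- a set comprehension over a duplicate-free list through an injective map is just the mapped list
theorem pvOfList_map_inj {α β : Type} [BEq β] [LawfulBEq β]
    (f : α → β) (hf : Function.Injective f) (l : List α) (hl : l.Nodup) :
    PySem.Set.ofList (l.map f) = l.map f :=
  PySem.Set.ofList_eq_self_of_nodup _ (hl.map hf)

theorem pvSwap_inj : Function.Injective (fun q : Int × Int => (q.2, q.1)) := by
  intro a b hab
  simp_all [Prod.ext_iff]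

theorem pvFlip_inj (h : Int) : Function.Injective (fun q : Int × Int => (q.1, h - q.2)) := by
  intro a b hab
  simp_all [Prod.ext_iff]

-- ===== VERDICT (by name: the statement is the Claim_ definition above) =====
theorem transformations_spec : Claim_equal_transformations := by
  intro pattern _
  unfold Spec_transformations transformations transformations_alt
  simp only []
  have hp : (toPixels pattern).Nodup := PySem.Set.nodup_ofList _
  set h : Int := PySem.List.len pattern - 1 with hh
  set p := toPixels pattern with hpdef
  have e1 := pvOfList_map_inj _ pvSwap_inj p hp
  rw [e1]
  have n1 := hp.map pvSwap_inj
  have e2 := pvOfList_map_inj _ (pvFlip_inj h) _ n1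
  rw [e2, List.map_map]
  have n2 := (hp.map pvSwap_inj).map (pvFlip_inj h)
  rw [List.map_map] at n2
  have e3 := pvOfList_map_inj _ pvSwap_inj _ n2
  rw [e3, List.map_map]
  have n3 := n2.map pvSwap_inj
  rw [List.map_map] at n3
  have e4 := pvOfList_map_inj _ (pvFlip_inj h) _ n3
  rw [e4, List.map_map]
  have n4 := n3.map (pvFlip_inj h)
  rw [List.map_map] at n4
  have e5 := pvOfList_map_inj _ pvSwap_inj _ n4
  rw [e5, List.map_map]
  have n5 := n4.map pvSwap_inj
  rw [List.map_map] at n5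
  have e6 := pvOfList_map_inj _ (pvFlip_inj h) _ n5
  rw [e6, List.map_map]
  have n6 := n5.map (pvFlip_inj h)
  rw [List.map_map] at n6
  have e7 := pvOfList_map_inj _ pvSwap_inj _ n6
  rw [e7, List.map_map]
  have b0 : PySem.Set.ofList (p.map (fun q : Int × Int => (q.1, q.2))) = p.map (fun q : Int × Int => (q.1, q.2)) :=
    pvOfList_map_inj _ (fun a b hab => by simp only [Prod.ext_iff] at hab ⊢; omega) p hp
  rw [b0]
  have b1 : PySem.Set.ofList (p.map (fun q : Int × Int => (q.2, h - q.1))) = p.map (fun q : Int × Int => (q.2, h - q.1)) :=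
    pvOfList_map_inj _ (fun a b hab => by simp only [Prod.ext_iff] at hab ⊢; omega) p hp
  rw [b1]
  have b2 : PySem.Set.ofList (p.map (fun q : Int × Int => (h - q.1, q.2))) = p.map (fun q : Int × Int => (h - q.1, q.2)) :=
    pvOfList_map_inj _ (fun a b hab => by simp only [Prod.ext_iff] at hab ⊢; omega) p hp
  rw [b2]
  have b3 : PySem.Set.ofList (p.map (fun q : Int × Int => (h - q.1, h - q.2))) = p.map (fun q : Int × Int => (h - q.1, h - q.2)) :=
    pvOfList_map_inj _ (fun a b hab => by simp only [Prod.ext_iff] at hab ⊢; omega) p hp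
  rw [b3]
  have b4 : PySem.Set.ofList (p.map (fun q : Int × Int => (h - q.2, h - q.1))) = p.map (fun q : Int × Int => (h - q.2, h - q.1)) :=
    pvOfList_map_inj _ (fun a b hab => by simp only [Prod.ext_iff] at hab ⊢; omega) p hp
  rw [b4]
  have b5 : PySem.Set.ofList (p.map (fun q : Int × Int => (h - q.2, q.1))) = p.map (fun q : Int × Int => (h - q.2, q.1)) :=
    pvOfList_map_inj _ (fun a b hab => by simp only [Prod.ext_iff] at hab ⊢; omega) p hp
  rw [b5]
  have b6 : PySem.Set.ofList (p.map (fun q : Int × Int => (q.1, h - q.2))) = p.map (fun q : Int × Int => (q.1, h - q.2)) :=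
    pvOfList_map_inj _ (fun a b hab => by simp only [Prod.ext_iff] at hab ⊢; omega) p hp
  rw [b6]
  have epid : p.map (fun q : Int × Int => (q.1, q.2)) = p := by simp
  rw [epid]
  simp only [Function.comp_def, sub_sub_cancel]
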